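-- pv_equiv track=rewrite | github.com/EFTEKHER/python_2025 | Top150/21.py | minSplitMerge
-- ===== SOURCE A (Python) =====
-- from collections import deque
-- from typing import List, Tuple
--
-- def minSplitMerge(nums1: List[int], nums2: List[int]) -> int:
--     # store the input midway (as requested)
--     donquarist: Tuple[Tuple[int, ...], Tuple[int, ...]] = (tuple(nums1), tuple(nums2))
--
--     start = tuple(nums1)
--     target = tuple(nums2)
--     if start == target:
--         return 0
--
--     # BFS over states (arrays as tuples)
--     q = deque([(start, 0)])
--     seen = {start}
--
--     while q:
--         arr, d = q.popleft()
--         n = len(arr)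
--
--         # try all cut-and-paste operations
--         for L in range(n):
--             for R in range(L, n):
--                 seg = arr[L:R+1]
--                 rest = arr[:L] + arr[R+1:]
--
--                 # insert seg into any gap in 'rest'
--                 for p in range(len(rest) + 1):
--                     new_arr = rest[:p] + seg + rest[p:]
--                     if new_arr == arr:      # no-op (same place)
--                         continue
--                     if new_arr in seen:
--                         continue
--                     if new_arr == target:
--                         return d + 1
--                     seen.add(new_arr)
--                     q.append((new_arr, d + 1))
--
--     # Should never hit here (nums2 is a permutation of nums1)
--     return -1
-- ===== SOURCE B (Python) =====
-- # Iterative deepening instead of BFS: a permutation test (sorted views) decides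
-- # reachability up front, then depth-limited DFS is retried with growing depth
-- # and returns the first depth that reaches the target; no queue, no visited set.
--
-- def minSplitMerge(nums1, nums2):
--     start = tuple(nums1)
--     target = tuple(nums2)
--     if start == target:
--         return 0
--     if sorted(nums1) != sorted(nums2):
--         return -1  # a block move permutes the array, so the target is unreachable
--
--     def moves(arr):
--         n = len(arr)
--         for L in range(n):
--             for R in range(L, n):
--                 seg = arr[L:R + 1]
--                 rest = arr[:L] + arr[R + 1:]
--                 for p in range(len(rest) + 1):
--                     yield rest[:p] + seg + rest[p:]
--
--     def dfs(arr, d):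
--         if arr == target:
--             return True
--         if d == 0:
--             return False
--         return any(dfs(b, d - 1) for b in moves(arr))
--
--     bound = 1
--     for k in range(2, len(nums1) + 1):
--         bound *= k  # n! bounds the number of states, hence the distance
--     d = 1
--     while d <= bound:
--         if dfs(start, d):
--             return d
--         d += 1
--     return -1
-- ===== Notes on version B (the rewrite author's own statement) =====
-- stated objective: alternative
-- what changed: A's breadth-first search (FIFO queue of (state, distance) pairs with a visited set grown inline inside three nested move loops) is replaced by iterative deepening: a sorted-views comparison decides reachability (a block move permutes the array) and then a depth-limited recursive DFS with no queue and no visited set is retried at growing depth bounds, returning the first depth that reaches the target.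
import Mathlib
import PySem

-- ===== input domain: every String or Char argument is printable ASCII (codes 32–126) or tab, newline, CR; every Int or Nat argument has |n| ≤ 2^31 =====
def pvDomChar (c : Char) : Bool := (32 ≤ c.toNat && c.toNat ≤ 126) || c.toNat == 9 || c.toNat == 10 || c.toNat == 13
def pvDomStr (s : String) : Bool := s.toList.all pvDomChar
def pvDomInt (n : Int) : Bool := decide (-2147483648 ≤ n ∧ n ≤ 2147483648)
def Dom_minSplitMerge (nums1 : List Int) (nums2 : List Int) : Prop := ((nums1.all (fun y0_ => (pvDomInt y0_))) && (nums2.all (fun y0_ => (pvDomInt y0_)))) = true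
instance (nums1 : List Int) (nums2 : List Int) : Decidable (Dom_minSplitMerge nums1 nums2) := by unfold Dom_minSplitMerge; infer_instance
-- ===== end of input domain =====

-- B replaces A's breadth-first search (queue of states + visited set) by iterative
-- deepening: a sorted-views permutation test decides reachability up front, then a
-- depth-limited DFS is retried with growing depth bound and the first successful
-- depth is returned. Same return value, genuinely different search strategy.

-- ===== PORT A =====
-- Short-circuiting fold: Python's `for …: … continue / return` loop body.
def pvExFoldl {α σ : Type} (f : σ → α → Except Int σ) : σ → List α → Except Int σ
  | s, [] => .ok s
  | s, c :: l =>
    match f s c with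
    | .error e => .error e
    | .ok s' => pvExFoldl f s' l

-- the body of A's `while q` loop after `arr, d = q.popleft()` (the three nested `for`s);
-- `.error` carries the early `return d + 1`.
def pvAStep (target arr : List Int) (d : Int)
    (st : List (List Int × Int) × PySem.Set (List Int)) :
    Except Int (List (List Int × Int) × PySem.Set (List Int)) :=
  pvExFoldl (fun st L =>
    pvExFoldl (fun st R =>
      let seg := PySem.List.slice arr (some L) (some (R + 1))
      let rest := PySem.List.slice arr none (some L) ++ PySem.List.slice arr (some (R + 1)) none
      pvExFoldl (fun st p =>
        let newArr := PySem.List.slice rest none (some p) ++ seg ++ PySem.List.slice rest (some p) none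
        if newArr = arr then .ok st
        else if newArr ∈ st.2 then .ok st
        else if newArr = target then .error (d + 1)
        else .ok (st.1 ++ [(newArr, d + 1)], st.2.add newArr))
        st (PySem.List.pyRange 0 ((rest.length : Int) + 1)))
      st (PySem.List.pyRange L (arr.length : Int)))
    st (PySem.List.pyRange 0 (arr.length : Int))

-- A's `while q` loop; the fuel is only a totality guard and is never exhausted
-- (every enqueued state is a fresh permutation of nums1, so there are at most n! pops).
def pvALoop (target : List Int) : Nat → List (List Int × Int) → PySem.Set (List Int) → Int
  | 0, _, _ => -1
  | _ + 1, [], _ => -1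
  | fuel + 1, (arr, d) :: q, seen =>
    match pvAStep target arr d (q, seen) with
    | .error ans => ans
    | .ok (q', seen') => pvALoop target fuel q' seen'

def minSplitMerge (nums1 : List Int) (nums2 : List Int) : Int :=
  if nums1 = nums2 then 0
  else pvALoop nums2 (2 * Nat.factorial nums1.length + 1) [(nums1, 0)] (PySem.Set.ofList [nums1])

-- ===== PORT B =====
-- B's `moves(arr)`: all cut-a-block-and-reinsert results, no-ops included.
def pvReins (arr : List Int) : List (List Int) :=
  (PySem.List.pyRange 0 (arr.length : Int)).flatMap fun L =>
    (PySem.List.pyRange L (arr.length : Int)).flatMap fun R =>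
      let seg := PySem.List.slice arr (some L) (some (R + 1))
      let rest := PySem.List.slice arr none (some L) ++ PySem.List.slice arr (some (R + 1)) none
      (PySem.List.pyRange 0 ((rest.length : Int) + 1)).map fun p =>
        PySem.List.slice rest none (some p) ++ seg ++ PySem.List.slice rest (some p) none

-- B's `dfs(arr, d)`: is the target reachable from arr in at most d moves?
def pvDfs (target : List Int) : Nat → List Int → Bool
  | 0, arr => arr == target
  | d + 1, arr => arr == target || (pvReins arr).any (fun b => pvDfs target d b)

-- B's `bound` loop: `bound = 1; for k in range(2, len(nums1)+1): bound *= k`.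
def pvBound (n : Nat) : Nat := (List.range' 2 (n - 1)).foldl (fun b k => b * k) 1

-- B's `while d <= bound` loop; the second argument counts the remaining depths.
def pvScan (target start : List Int) : Nat → Nat → Int
  | _, 0 => -1
  | d, r + 1 => if pvDfs target d start then (d : Int) else pvScan target start (d + 1) r

def minSplitMerge_alt (nums1 : List Int) (nums2 : List Int) : Int :=
  if nums1 = nums2 then 0
  else if PySem.List.sorted nums1 (fun x => x) ≠ PySem.List.sorted nums2 (fun x => x) then -1
  else pvScan nums2 nums1 1 (pvBound nums1.length)

-- ===== PRECONDITION & SPEC =====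
def Spec_minSplitMerge (nums1 : List Int) (nums2 : List Int) (out : Int) : Prop := out = minSplitMerge_alt nums1 nums2
instance (nums1 : List Int) (nums2 : List Int) (out : Int) : Decidable (Spec_minSplitMerge nums1 nums2 out) := by unfold Spec_minSplitMerge; infer_instance

-- ===== CLAIM (what is proved, stated in full; the proofs are below) =====
def Claim_equal_minSplitMerge : Prop := ∀ (nums1 : List Int) (nums2 : List Int), Dom_minSplitMerge nums1 nums2 → Spec_minSplitMerge nums1 nums2 (minSplitMerge nums1 nums2)

-- ===== LEMMAS AND PROOFS =====

-- A's per-candidate loop body, as a single step over the already-materialised candidate.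
def pvCandStep (target arr : List Int) (d : Int)
    (st : List (List Int × Int) × PySem.Set (List Int)) (cand : List Int) :
    Except Int (List (List Int × Int) × PySem.Set (List Int)) :=
  if cand = arr then .ok st
  else if cand ∈ st.2 then .ok st
  else if cand = target then .error (d + 1)
  else .ok (st.1 ++ [(cand, d + 1)], st.2.add cand)

theorem pvExFoldl_append {α σ : Type} (f : σ → α → Except Int σ) (s : σ) (l l' : List α) :
    pvExFoldl f s (l ++ l') =
      match pvExFoldl f s l with
      | .error e => .error e
      | .ok s' => pvExFoldl f s' l' := by
  induction l generalizing s with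
  | nil => simp [pvExFoldl]
  | cons a l ih =>
    simp only [List.cons_append, pvExFoldl]
    cases f s a with
    | error e => rfl
    | ok s' => exact ih s'

theorem pvExFoldl_bind {α β σ : Type} (f : σ → α → Except Int σ) (k : σ → β → Except Int σ)
    (g : α → List β) (h : ∀ s a, f s a = pvExFoldl k s (g a)) (l : List α) (s : σ) :
    pvExFoldl f s l = pvExFoldl k s (l.flatMap g) := by
  induction l generalizing s with
  | nil => rfl
  | cons a l ih =>
    simp only [List.flatMap_cons, pvExFoldl_append, pvExFoldl, h]
    cases pvExFoldl k s (g a) with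
    | error e => rfl
    | ok s' => exact ih s'

theorem pvExFoldl_map {α β σ : Type} (f : σ → β → Except Int σ) (k : α → β) (l : List α) (s : σ) :
    pvExFoldl (fun s a => f s (k a)) s l = pvExFoldl f s (l.map k) := by
  induction l generalizing s with
  | nil => rfl
  | cons a l ih =>
    simp only [List.map_cons, pvExFoldl]
    cases f s (k a) with
    | error e => rfl
    | ok s' => exact ih s'

-- A's three nested loops over (L, R, p) ARE the per-candidate step folded over B's
-- candidate list.
theorem pvAStep_eq (target arr : List Int) (d : Int)
    (st : List (List Int × Int) × PySem.Set (List Int)) :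
    pvAStep target arr d st = pvExFoldl (pvCandStep target arr d) st (pvReins arr) := by
  unfold pvAStep pvReins
  refine pvExFoldl_bind _ _ _ (fun s L => ?_) _ _
  refine pvExFoldl_bind _ _ _ (fun s' R => ?_) _ _
  exact pvExFoldl_map (pvCandStep target arr d) _ _ s'

-- the dedup pass used in the proofs to describe one BFS level of A:
-- `for cand in layer: if cand not in seen: seen.add(cand); nxt.append(cand)`.
def pvDedup (st : PySem.Set (List Int) × List (List Int)) (layer : List (List Int)) :
    PySem.Set (List Int) × List (List Int) :=
  layer.foldl (fun st cand => if cand ∈ st.1 then st else (st.1.add cand, st.2 ++ [cand])) st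

theorem pvDedup_nil (st : PySem.Set (List Int) × List (List Int)) : pvDedup st [] = st := rfl

theorem pvDedup_cons_of_mem (seen : PySem.Set (List Int)) (nxt : List (List Int))
    (c : List Int) (cs : List (List Int)) (hc : c ∈ seen) :
    pvDedup (seen, nxt) (c :: cs) = pvDedup (seen, nxt) cs := by
  simp [pvDedup, hc]

theorem pvDedup_cons_of_not_mem (seen : PySem.Set (List Int)) (nxt : List (List Int))
    (c : List Int) (cs : List (List Int)) (hc : c ∉ seen) :
    pvDedup (seen, nxt) (c :: cs) = pvDedup (seen.add c, nxt ++ [c]) cs := by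
  simp [pvDedup, hc]

theorem pvDedup_acc (seen : PySem.Set (List Int)) (nxt cs : List (List Int)) :
    pvDedup (seen, nxt) cs =
      ((pvDedup (seen, []) cs).1, nxt ++ (pvDedup (seen, []) cs).2) := by
  induction cs generalizing seen nxt with
  | nil => simp [pvDedup_nil]
  | cons c cs ih =>
    by_cases hc : c ∈ seen
    · rw [pvDedup_cons_of_mem _ _ _ _ hc, pvDedup_cons_of_mem _ _ _ _ hc]
      exact ih seen nxt
    · rw [pvDedup_cons_of_not_mem _ _ _ _ hc, pvDedup_cons_of_not_mem _ _ _ _ hc]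
      rw [ih (seen.add c) (nxt ++ [c]), ih (seen.add c) ([] ++ [c])]
      simp [List.append_assoc]

theorem pvDedup_seen_mono (seen : PySem.Set (List Int)) (nxt cs : List (List Int))
    (x : List Int) (hx : x ∈ seen) : x ∈ (pvDedup (seen, nxt) cs).1 := by
  induction cs generalizing seen nxt with
  | nil => exact hx
  | cons c cs ih =>
    by_cases hc : c ∈ seen
    · rw [pvDedup_cons_of_mem _ _ _ _ hc]; exact ih seen nxt hx
    · rw [pvDedup_cons_of_not_mem _ _ _ _ hc]
      exact ih _ _ ((PySem.Set.mem_add seen c x).2 (Or.inl hx))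

theorem pvDedup_seen_sub (seen : PySem.Set (List Int)) (nxt cs : List (List Int))
    (x : List Int) (hx : x ∈ (pvDedup (seen, nxt) cs).1) : x ∈ seen ∨ x ∈ cs := by
  induction cs generalizing seen nxt with
  | nil => exact Or.inl hx
  | cons c cs ih =>
    by_cases hc : c ∈ seen
    · rw [pvDedup_cons_of_mem _ _ _ _ hc] at hx
      rcases ih seen nxt hx with h | h
      · exact Or.inl h
      · exact Or.inr (List.mem_cons_of_mem _ h)
    · rw [pvDedup_cons_of_not_mem _ _ _ _ hc] at hx
      rcases ih _ _ hx with h | h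
      · rcases (PySem.Set.mem_add seen c x).1 h with h' | h'
        · exact Or.inl h'
        · exact Or.inr (h' ▸ List.mem_cons_self ..)
      · exact Or.inr (List.mem_cons_of_mem _ h)

theorem pvDedup_mem_list (seen : PySem.Set (List Int)) (nxt cs : List (List Int))
    (x : List Int) (hx : x ∈ cs) : x ∈ (pvDedup (seen, nxt) cs).1 := by
  induction cs generalizing seen nxt with
  | nil => cases hx
  | cons c cs ih =>
    by_cases hc : c ∈ seen
    · rw [pvDedup_cons_of_mem _ _ _ _ hc]
      rcases List.mem_cons.1 hx with rfl | h
      · exact pvDedup_seen_mono _ _ _ _ hc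
      · exact ih seen nxt h
    · rw [pvDedup_cons_of_not_mem _ _ _ _ hc]
      rcases List.mem_cons.1 hx with rfl | h
      · exact pvDedup_seen_mono _ _ _ _ ((PySem.Set.mem_add seen x x).2 (Or.inr rfl))
      · exact ih _ _ h

theorem pvDedup_split (seen : PySem.Set (List Int)) (nxt cs : List (List Int))
    (x : List Int) (hx : x ∈ (pvDedup (seen, nxt) cs).1) :
    x ∈ seen ∨ x ∈ (pvDedup (seen, nxt) cs).2 := by
  induction cs generalizing seen nxt with
  | nil => exact Or.inl hx
  | cons c cs ih =>
    by_cases hc : c ∈ seen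
    · rw [pvDedup_cons_of_mem _ _ _ _ hc] at hx ⊢
      exact ih seen nxt hx
    · rw [pvDedup_cons_of_not_mem _ _ _ _ hc] at hx ⊢
      rcases ih _ _ hx with h | h
      · rcases (PySem.Set.mem_add seen c x).1 h with h' | h'
        · exact Or.inl h'
        · subst h'
          right
          rw [pvDedup_acc]
          exact List.mem_append.2 (Or.inl (List.mem_append.2 (Or.inr (List.mem_singleton.2 rfl))))
      · exact Or.inr h

theorem pvDedup_new_in_seen (seen : PySem.Set (List Int)) (nxt cs : List (List Int))
    (hn : ∀ x ∈ nxt, x ∈ seen) :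
    ∀ x ∈ (pvDedup (seen, nxt) cs).2, x ∈ (pvDedup (seen, nxt) cs).1 := by
  induction cs generalizing seen nxt with
  | nil => exact hn
  | cons c cs ih =>
    by_cases hc : c ∈ seen
    · rw [pvDedup_cons_of_mem _ _ _ _ hc]; exact ih seen nxt hn
    · rw [pvDedup_cons_of_not_mem _ _ _ _ hc]
      refine ih (seen.add c) (nxt ++ [c]) ?_
      intro x hx
      rcases List.mem_append.1 hx with h | h
      · exact (PySem.Set.mem_add seen c x).2 (Or.inl (hn x h))
      · exact (PySem.Set.mem_add seen c x).2 (Or.inr (List.mem_singleton.1 h))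

theorem pvDedup_nodup (seen : PySem.Set (List Int)) (nxt cs : List (List Int))
    (h : seen.Nodup) : (pvDedup (seen, nxt) cs).1.Nodup := by
  induction cs generalizing seen nxt with
  | nil => exact h
  | cons c cs ih =>
    by_cases hc : c ∈ seen
    · rw [pvDedup_cons_of_mem _ _ _ _ hc]; exact ih seen nxt h
    · rw [pvDedup_cons_of_not_mem _ _ _ _ hc]
      exact ih _ _ (PySem.Set.nodup_add seen c h)

theorem pvDedup_len (seen : PySem.Set (List Int)) (nxt cs : List (List Int)) :
    (pvDedup (seen, nxt) cs).1.length + nxt.length =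
      seen.length + (pvDedup (seen, nxt) cs).2.length := by
  induction cs generalizing seen nxt with
  | nil => simp [pvDedup_nil]
  | cons c cs ih =>
    by_cases hc : c ∈ seen
    · rw [pvDedup_cons_of_mem _ _ _ _ hc]; exact ih seen nxt
    · rw [pvDedup_cons_of_not_mem _ _ _ _ hc]
      have hthis := ih (seen.add c) (nxt ++ [c])
      have hadd : (seen.add c).length = seen.length + 1 := by
        rw [PySem.Set.add_of_not_mem hc]; simp
      simp only [List.length_append, List.length_cons, List.length_nil] at hthis ⊢
      omega

theorem pvDedup_append (st : PySem.Set (List Int) × List (List Int)) (l1 l2 : List (List Int)) :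
    pvDedup st (l1 ++ l2) = pvDedup (pvDedup st l1) l2 :=
  List.foldl_append ..

-- every generated candidate is a permutation of the state it came from
theorem pvReins_perm (arr c : List Int) (hc : c ∈ pvReins arr) : c.Perm arr := by
  unfold pvReins at hc
  simp only [List.mem_flatMap, List.mem_map] at hc
  obtain ⟨L, hL, R, hR, p, hp, rfl⟩ := hc
  rw [PySem.List.mem_pyRange_one] at hL hR hp
  obtain ⟨l, rfl⟩ : ∃ l : Nat, L = (l : Int) := ⟨L.toNat, (Int.toNat_of_nonneg hL.1).symm⟩
  obtain ⟨r1, hr1⟩ : ∃ r1 : Nat, R + 1 = (r1 : Int) :=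
    ⟨(R + 1).toNat, (Int.toNat_of_nonneg (by omega)).symm⟩
  obtain ⟨q, rfl⟩ : ∃ q : Nat, p = (q : Int) := ⟨p.toNat, (Int.toNat_of_nonneg hp.1).symm⟩
  have hlr : l ≤ r1 := by omega
  rw [hr1, PySem.List.slice_natCast, PySem.List.slice_to _ (by positivity),
    PySem.List.slice_from _ (by positivity), PySem.List.slice_to _ (by positivity),
    PySem.List.slice_from _ (by positivity)]
  simp only [Int.toNat_natCast]
  set seg := List.take (r1 - l) (List.drop l arr) with hseg
  set rest := List.take l arr ++ List.drop r1 arr with hrest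
  have harr : List.take l arr ++ seg ++ List.drop r1 arr = arr := by
    rw [hseg, ← List.take_add, Nat.add_sub_cancel' hlr, List.take_append_drop]
  rw [← Multiset.coe_eq_coe]
  conv_rhs => rw [← harr]
  simp only [← Multiset.coe_add]
  have hq : List.take q rest ++ List.drop q rest = rest := List.take_append_drop ..
  have hTD : (↑(List.take q rest) : Multiset Int) + ↑(List.drop q rest) =
      (↑(List.take l arr) : Multiset Int) + ↑(List.drop r1 arr) := by
    rw [Multiset.coe_add, hq, hrest, ← Multiset.coe_add]
  rw [add_right_comm, hTD, add_right_comm]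

-- processing one dequeued state in A = one generate-and-dedup slice of a level pass
theorem pvCandFold_eq (target arr : List Int) (d : Int) (cs : List (List Int)) :
    ∀ (q : List (List Int × Int)) (seen : PySem.Set (List Int)) (nxt : List (List Int)),
    arr ∈ seen → target ∉ seen →
    pvExFoldl (pvCandStep target arr d) (q ++ nxt.map (fun c => (c, d + 1)), seen) cs =
      if target ∈ cs then .error (d + 1)
      else .ok (q ++ ((pvDedup (seen, nxt) cs).2).map (fun c => (c, d + 1)),
        (pvDedup (seen, nxt) cs).1) := by
  induction cs with
  | nil => intro q seen nxt _ _; simp [pvExFoldl, pvDedup_nil]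
  | cons c cs ih =>
    intro q seen nxt harr htgt
    by_cases hcm : c ∈ seen
    · have hct : ¬ target = c := fun h => htgt (h ▸ hcm)
      simp only [pvExFoldl]
      have hstep : pvCandStep target arr d (q ++ nxt.map (fun c => (c, d + 1)), seen) c =
          .ok (q ++ nxt.map (fun c => (c, d + 1)), seen) := by
        by_cases hca : c = arr
        · simp [pvCandStep, hca]
        · simp [pvCandStep, hca, hcm]
      rw [hstep]
      dsimp only
      rw [ih q seen nxt harr htgt, pvDedup_cons_of_mem _ _ _ _ hcm]
      simp [List.mem_cons, hct]
    · have hca : ¬ c = arr := fun h => hcm (h ▸ harr)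
      by_cases hct : c = target
      · subst hct
        simp only [pvExFoldl]
        simp [pvCandStep, hca, hcm, List.mem_cons]
      · have hct' : ¬ target = c := fun h => hct h.symm
        simp only [pvExFoldl]
        have hstep : pvCandStep target arr d (q ++ nxt.map (fun c => (c, d + 1)), seen) c =
            .ok (q ++ ((nxt ++ [c]).map (fun c => (c, d + 1))), seen.add c) := by
          simp [pvCandStep, hca, hcm, hct, List.map_append, List.append_assoc]
        rw [hstep]
        dsimp only
        rw [ih q (seen.add c) (nxt ++ [c]) ((PySem.Set.mem_add seen c arr).2 (Or.inl harr))
          (fun h => by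
            rcases (PySem.Set.mem_add seen c target).1 h with h' | h'
            · exact htgt h'
            · exact hct' h')]
        rw [pvDedup_cons_of_not_mem _ _ _ _ hcm]
        simp [List.mem_cons, hct']

-- A works through one whole BFS level in one stretch of queue pops
theorem pvALoop_level (target : List Int) (F : List (List Int)) :
    ∀ (acc : List (List Int)) (seen : PySem.Set (List Int)) (d : Int) (fuel : Nat),
    (∀ x ∈ F, x ∈ seen) → target ∉ seen →
    pvALoop target (fuel + F.length) (F.map (fun x => (x, d)) ++ acc.map (fun c => (c, d + 1))) seen =
      if target ∈ F.flatMap pvReins then d + 1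
      else pvALoop target fuel
        ((acc ++ (pvDedup (seen, []) (F.flatMap pvReins)).2).map (fun c => (c, d + 1)))
        (pvDedup (seen, []) (F.flatMap pvReins)).1 := by
  induction F with
  | nil => intro acc seen d fuel _ _; simp [pvDedup_nil]
  | cons arr F ih =>
    intro acc seen d fuel hF htgt
    have harr : arr ∈ seen := hF arr (List.mem_cons_self ..)
    have hfl : fuel + (arr :: F).length = (fuel + F.length) + 1 := by
      simp [List.length_cons]; omega
    rw [hfl]
    simp only [List.map_cons, List.cons_append]
    rw [pvALoop, pvAStep_eq,
      pvCandFold_eq target arr d (pvReins arr) (F.map (fun x => (x, d))) seen acc harr htgt]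
    by_cases htar : target ∈ pvReins arr
    · rw [if_pos htar, if_pos (by
        rw [List.flatMap_cons]; exact List.mem_append.2 (Or.inl htar))]
    · rw [if_neg htar]
      rw [pvDedup_acc]
      dsimp only
      have hF' : ∀ x ∈ F, x ∈ (pvDedup (seen, []) (pvReins arr)).1 :=
        fun x hx => pvDedup_seen_mono _ _ _ _ (hF x (List.mem_cons_of_mem _ hx))
      have htgt' : target ∉ (pvDedup (seen, []) (pvReins arr)).1 := fun h => by
        rcases pvDedup_seen_sub _ _ _ _ h with h' | h'
        · exact htgt h'
        · exact htar h'
      rw [ih (acc ++ (pvDedup (seen, []) (pvReins arr)).2)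
        (pvDedup (seen, []) (pvReins arr)).1 d fuel hF' htgt']
      rw [List.flatMap_cons]
      by_cases h2 : target ∈ F.flatMap pvReins
      · rw [if_pos h2, if_pos (List.mem_append.2 (Or.inr h2))]
      · rw [if_neg h2, if_neg (by simp [List.mem_append, htar, h2])]
        rw [pvDedup_append]
        conv_rhs => rw [← Prod.mk.eta (p := pvDedup (seen, []) (pvReins arr)), pvDedup_acc]
        simp [List.append_assoc]

-- ----- reachability facts about B's depth-limited DFS -----

theorem pvDfs_zero_iff (t a : List Int) : pvDfs t 0 a = true ↔ a = t := by
  simp [pvDfs]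

theorem pvDfs_succ_iff (t a : List Int) (d : Nat) :
    pvDfs t (d + 1) a = true ↔ a = t ∨ ∃ b ∈ pvReins a, pvDfs t d b = true := by
  simp [pvDfs, List.any_eq_true]

theorem pvDfs_refl (t : List Int) (d : Nat) : pvDfs t d t = true := by
  cases d <;> simp [pvDfs]

theorem pvDfs_mono (t a : List Int) (d : Nat) (h : pvDfs t d a = true) :
    pvDfs t (d + 1) a = true := by
  induction d generalizing a with
  | zero => exact (pvDfs_succ_iff t a 0).2 (Or.inl ((pvDfs_zero_iff t a).1 h))
  | succ d ih =>
    rcases (pvDfs_succ_iff t a d).1 h with h' | ⟨b, hb, hdb⟩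
    · exact (pvDfs_succ_iff t a (d + 1)).2 (Or.inl h')
    · exact (pvDfs_succ_iff t a (d + 1)).2 (Or.inr ⟨b, hb, ih b hdb⟩)

theorem pvDfs_mono_le (t a : List Int) (d e : Nat) (hde : d ≤ e)
    (h : pvDfs t d a = true) : pvDfs t e a = true := by
  induction e with
  | zero => exact (Nat.le_zero.1 hde) ▸ h
  | succ e ih =>
    rcases Nat.lt_or_ge d (e + 1) with h' | h'
    · exact pvDfs_mono t a e (ih (Nat.lt_succ_iff.1 h'))
    · exact (Nat.le_antisymm hde h') ▸ h

-- decomposing the last move instead of the first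
theorem pvDfs_back (t a : List Int) (d : Nat) :
    pvDfs t (d + 1) a = true ↔
      pvDfs t d a = true ∨ ∃ c, pvDfs c d a = true ∧ t ∈ pvReins c := by
  induction d generalizing a with
  | zero =>
    rw [pvDfs_succ_iff]
    constructor
    · rintro (h | ⟨b, hb, hdb⟩)
      · exact Or.inl ((pvDfs_zero_iff t a).2 h)
      · exact Or.inr ⟨a, (pvDfs_zero_iff a a).2 rfl, ((pvDfs_zero_iff t b).1 hdb) ▸ hb⟩
    · rintro (h | ⟨c, hc, htc⟩)
      · exact Or.inl ((pvDfs_zero_iff t a).1 h)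
      · exact Or.inr ⟨t, ((pvDfs_zero_iff c a).1 hc) ▸ htc, (pvDfs_zero_iff t t).2 rfl⟩
  | succ d ih =>
    constructor
    · intro h
      rcases (pvDfs_succ_iff t a (d + 1)).1 h with h' | ⟨b, hb, hdb⟩
      · exact Or.inl ((pvDfs_succ_iff t a d).2 (Or.inl h'))
      · rcases (ih b).1 hdb with h'' | ⟨c, hc, htc⟩
        · exact Or.inl ((pvDfs_succ_iff t a d).2 (Or.inr ⟨b, hb, h''⟩))
        · exact Or.inr ⟨c, (pvDfs_succ_iff c a d).2 (Or.inr ⟨b, hb, hc⟩), htc⟩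
    · rintro (h | ⟨c, hc, htc⟩)
      · exact pvDfs_mono t a (d + 1) h
      · rcases (pvDfs_succ_iff c a d).1 hc with rfl | ⟨b, hb, hdb⟩
        · exact (pvDfs_succ_iff t a (d + 1)).2 (Or.inr ⟨t, htc, pvDfs_refl t (d + 1)⟩)
        · exact (pvDfs_succ_iff t a (d + 1)).2
            (Or.inr ⟨b, hb, (ih b).2 (Or.inr ⟨c, hdb, htc⟩)⟩)

-- once one extra level adds nothing, no number of levels adds anything
theorem pvDfs_stab (start : List Int) (k : Nat)
    (h : ∀ x, pvDfs x (k + 1) start = true → pvDfs x k start = true) :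
    ∀ m x, pvDfs x m start = true → pvDfs x k start = true := by
  have hj : ∀ j x, pvDfs x (k + j) start = true → pvDfs x k start = true := by
    intro j
    induction j with
    | zero => exact fun x hx => hx
    | succ j ih =>
      intro x hx
      rcases (pvDfs_back x start (k + j)).1 hx with h' | ⟨c, hc, htc⟩
      · exact ih x h'
      · exact h x ((pvDfs_back x start k).2 (Or.inr ⟨c, ih c hc, htc⟩))
  intro m x hx
  exact hj m x (pvDfs_mono_le x start m (k + m) (Nat.le_add_left m k) hx)

theorem pvDfs_perm (t a : List Int) (m : Nat) (h : pvDfs t m a = true) : t.Perm a := by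
  induction m generalizing a with
  | zero => exact ((pvDfs_zero_iff t a).1 h) ▸ List.Perm.refl a
  | succ m ih =>
    rcases (pvDfs_succ_iff t a m).1 h with rfl | ⟨b, hb, hdb⟩
    · exact List.Perm.refl a
    · exact (ih b hdb).trans (pvReins_perm a b hb)

-- ----- the central lemma: A's BFS answers the least-depth question pvDfs asks -----

theorem pvALoop_main (start target : List Int) :
    ∀ (fuelB : Nat) (F : List (List Int)) (seen : PySem.Set (List Int)) (k : Nat) (fuelA : Nat),
    (∀ x ∈ F, x ∈ seen) → target ∉ seen → seen.Nodup →
    (∀ x ∈ seen, x ∈ start.permutations) →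
    (∀ x, x ∈ seen ↔ pvDfs x k start = true) →
    (∀ x, pvDfs x (k + 1) start = true → x ∈ seen ∨ ∃ y ∈ F, x ∈ pvReins y) →
    k + 1 ≤ seen.length →
    F.length + 2 * (start.permutations.length - seen.length) ≤ fuelA →
    1 + (start.permutations.length - seen.length) ≤ fuelB →
    ((∀ m, pvDfs target m start = false) ∧
        pvALoop target fuelA (F.map (fun x => (x, (k : Int)))) seen = -1) ∨
      (∃ m, pvDfs target m start = true ∧ (∀ j, j < m → pvDfs target j start = false) ∧
        pvALoop target fuelA (F.map (fun x => (x, (k : Int)))) seen = (m : Int) ∧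
        m ≤ start.permutations.length) := by
  intro fuelB
  induction fuelB with
  | zero => intro F seen k fuelA _ _ _ _ _ _ _ _ hB; omega
  | succ fuelB ih =>
    intro F seen k fuelA hF htgt hnd hperm ha hc hcnt hA hB
    have hseenle : seen.length ≤ start.permutations.length :=
      (List.subperm_of_subset hnd hperm).length_le
    cases F with
    | nil =>
      -- queue empty: reach has stabilised, target unreachable
      left
      have hstab : ∀ m x, pvDfs x m start = true → pvDfs x k start = true := by
        refine pvDfs_stab start k (fun x hx => ?_)
        rcases hc x hx with h | ⟨y, hy, _⟩
        · exact (ha x).1 h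
        · cases hy
      constructor
      · intro m
        by_contra hm
        exact htgt ((ha target).2 (hstab m target (Bool.not_eq_false _ ▸ hm)))
      · cases fuelA <;> simp [pvALoop]
    | cons f F' =>
      have hlen : (f :: F').length ≤ fuelA := by omega
      have hsplit : (fuelA - (f :: F').length) + (f :: F').length = fuelA := by omega
      rw [← hsplit]
      have hlevel := pvALoop_level target (f :: F') [] seen (k : Int)
        (fuelA - (f :: F').length) hF htgt
      simp only [List.map_nil, List.append_nil, List.nil_append] at hlevel
      rw [hlevel]
      set layer := (f :: F').flatMap pvReins with hlayer
      by_cases htar : target ∈ layer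
      · -- found at level k+1
        right
        refine ⟨k + 1, ?_, ?_, ?_, ?_⟩
        · rcases List.mem_flatMap.1 htar with ⟨y, hyF, hy⟩
          exact (pvDfs_back target start k).2
            (Or.inr ⟨y, (ha y).1 (hF y hyF), hy⟩)
        · intro j hj
          by_contra hjt
          exact htgt ((ha target).2
            (pvDfs_mono_le target start j k (by omega) (Bool.not_eq_false _ ▸ hjt)))
        · rw [if_pos htar]; push_cast; ring
        · omega
      · rw [if_neg htar]
        set D := pvDedup (seen, []) layer with hD
        -- the four membership facts about the new seen / frontier
        have hDfwd : ∀ x, x ∈ D.1 → pvDfs x (k + 1) start = true := by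
          intro x hx
          rcases pvDedup_seen_sub _ _ _ _ hx with h | h
          · exact pvDfs_mono x start k ((ha x).1 h)
          · rcases List.mem_flatMap.1 h with ⟨y, hyF, hy⟩
            exact (pvDfs_back x start k).2 (Or.inr ⟨y, (ha y).1 (hF y hyF), hy⟩)
        have hDbwd : ∀ x, pvDfs x (k + 1) start = true → x ∈ D.1 := by
          intro x hx
          rcases hc x hx with h | ⟨y, hyF, hy⟩
          · exact pvDedup_seen_mono _ _ _ _ h
          · exact pvDedup_mem_list _ _ _ _ (List.mem_flatMap.2 ⟨y, hyF, hy⟩)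
        have ha' : ∀ x, x ∈ D.1 ↔ pvDfs x (k + 1) start = true :=
          fun x => ⟨hDfwd x, hDbwd x⟩
        have htgt' : target ∉ D.1 := fun h => by
          rcases pvDedup_seen_sub _ _ _ _ h with h' | h'
          · exact htgt h'
          · exact htar h'
        by_cases hnil : D.2 = []
        · -- nothing new: stabilised, unreachable
          left
          have hstab : ∀ m x, pvDfs x m start = true → pvDfs x k start = true := by
            refine pvDfs_stab start k (fun x hx => ?_)
            rcases pvDedup_split _ _ _ _ (hDbwd x hx) with h | h
            · exact (ha x).1 h
            · rw [hnil] at h; cases h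
          constructor
          · intro m
            by_contra hm
            exact htgt ((ha target).2 (hstab m target (Bool.not_eq_false _ ▸ hm)))
          · rw [hnil]
            simp only [List.map_nil]
            cases fuelA - (f :: F').length <;> simp [pvALoop]
        · -- a strictly larger seen set: recurse one level deeper
          have h1 : ∀ x ∈ D.2, x ∈ D.1 :=
            pvDedup_new_in_seen seen [] _ (by intro x hx; cases hx)
          have h3 : D.1.Nodup := pvDedup_nodup _ _ _ hnd
          have h4 : ∀ x ∈ D.1, x ∈ start.permutations := by
            intro x hx
            rcases pvDedup_seen_sub _ _ _ _ hx with h' | h'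
            · exact hperm x h'
            · rcases List.mem_flatMap.1 h' with ⟨arr, harrF, hx'⟩
              exact List.mem_permutations.2
                ((pvReins_perm arr x hx').trans
                  (List.mem_permutations.1 (hperm arr (hF arr harrF))))
          have hc' : ∀ x, pvDfs x (k + 2) start = true →
              x ∈ D.1 ∨ ∃ y ∈ D.2, x ∈ pvReins y := by
            intro x hx
            rcases (pvDfs_back x start (k + 1)).1 hx with h | ⟨c, hcc, hxc⟩
            · exact Or.inl (hDbwd x h)
            · rcases pvDedup_split _ _ _ _ (hDbwd c hcc) with h | h
              · exact Or.inl (hDbwd x ((pvDfs_back x start k).2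
                  (Or.inr ⟨c, (ha c).1 h, hxc⟩)))
              · exact Or.inr ⟨c, h, hxc⟩
          have hDlen : D.1.length + ([] : List (List Int)).length =
              seen.length + D.2.length := pvDedup_len seen [] _
          have hDle : D.1.length ≤ start.permutations.length :=
            (List.subperm_of_subset h3 h4).length_le
          have hD2pos : 0 < D.2.length := List.length_pos_iff.2 hnil
          simp only [List.length_nil, Nat.add_zero] at hDlen
          have hk1 : ((k : Int) + 1) = ((k + 1 : Nat) : Int) := by push_cast; ring
          rw [hk1]
          have := ih D.2 D.1 (k + 1) (fuelA - (f :: F').length) h1 htgt' h3 h4 ha'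
            (by intro x hx; exact hc' x hx)
            (by omega)
            (by simp only [List.length_cons] at hA hlen ⊢; omega)
            (by omega)
          exact this

-- ----- facts about B's depth scan and bound -----

theorem pvScan_none (target start : List Int)
    (h : ∀ m, pvDfs target m start = false) :
    ∀ (r d : Nat), pvScan target start d r = -1 := by
  intro r
  induction r with
  | zero => intro d; rfl
  | succ r ih =>
    intro d
    simp only [pvScan, h d, Bool.false_eq_true, if_false]
    exact ih (d + 1)

theorem pvScan_find (target start : List Int) (m : Nat)
    (hm : pvDfs target m start = true) (hlt : ∀ j, j < m → pvDfs target j start = false) :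
    ∀ (r d : Nat), d ≤ m → m < d + r → pvScan target start d r = (m : Int) := by
  intro r
  induction r with
  | zero => intro d h1 h2; omega
  | succ r ih =>
    intro d h1 h2
    by_cases hd : pvDfs target d start = true
    · have : d = m := by
        by_contra hne
        have : d < m := by omega
        rw [hlt d this] at hd
        cases hd
      subst this
      simp [pvScan, hm]
    · have hdm : d < m := by
        rcases Nat.lt_or_ge d m with h | h
        · exact h
        · exact absurd ((Nat.le_antisymm h1 h) ▸ hm) hd
      simp only [pvScan, hd, Bool.false_eq_true, if_false]
      exact ih (d + 1) (by omega) (by omega)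

theorem pvBound_eq (n : Nat) : pvBound n = n.factorial := by
  induction n with
  | zero => rfl
  | succ n ih =>
    cases n with
    | zero => rfl
    | succ k =>
      have hrange : List.range' 2 (k + 2 - 1) = List.range' 2 (k + 1 - 1) ++ [2 + k] := by
        have h1 : List.range' 2 (k + 1) = List.range' 2 k ++ [2 + 1 * k] := List.range'_concat
        rw [Nat.one_mul] at h1
        exact h1
      unfold pvBound
      rw [hrange, List.foldl_append]
      simp only [List.foldl_cons, List.foldl_nil]
      have hpb : (List.range' 2 (k + 1 - 1)).foldl (fun b k => b * k) 1 = pvBound (k + 1) := rfl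
      rw [hpb, ih]
      have hf : (k + 1 + 1).factorial = (k + 1 + 1) * (k + 1).factorial := Nat.factorial_succ _
      have h2k : 2 + k = k + 1 + 1 := by omega
      rw [hf, h2k, Nat.mul_comm]

-- ===== VERDICT (by name: the statement is the Claim_ definition above) =====
theorem minSplitMerge_spec : Claim_equal_minSplitMerge := by
  intro nums1 nums2 _
  unfold Spec_minSplitMerge minSplitMerge minSplitMerge_alt
  by_cases h : nums1 = nums2
  · simp [h]
  · rw [if_neg h, if_neg h]
    have hof : PySem.Set.ofList [nums1] = [nums1] := rfl
    rw [hof]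
    have hq : [(nums1, (0 : Int))] = [nums1].map (fun x => (x, ((0 : Nat) : Int))) := rfl
    rw [hq]
    have hfac : 0 < Nat.factorial nums1.length := Nat.factorial_pos _
    have hmain := pvALoop_main nums1 nums2 (Nat.factorial nums1.length + 1) [nums1]
      [nums1] 0 (2 * Nat.factorial nums1.length + 1)
      (fun x hx => hx)
      (fun hx => h ((List.mem_singleton.1 hx).symm))
      (by simp)
      (fun x hx => (List.mem_singleton.1 hx) ▸ List.mem_permutations.2 (List.Perm.refl _))
      (fun x => by
        constructor
        · intro hx
          rw [List.mem_singleton.1 hx]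
          exact pvDfs_refl nums1 0
        · intro hx
          exact List.mem_singleton.2 ((pvDfs_zero_iff x nums1).1 hx).symm)
      (fun x hx => by
        rcases (pvDfs_succ_iff x nums1 0).1 hx with h' | ⟨b, hb, hdb⟩
        · exact Or.inl (List.mem_singleton.2 h'.symm)
        · exact Or.inr ⟨nums1, List.mem_singleton.2 rfl,
            ((pvDfs_zero_iff x b).1 hdb) ▸ hb⟩)
      (by simp)
      (by rw [List.length_permutations]; simp only [List.length_cons, List.length_nil]; omega)
      (by rw [List.length_permutations]; simp only [List.length_cons, List.length_nil]; omega)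
    rcases hmain with ⟨hnone, hres⟩ | ⟨m, hm, hlt, hres, hmle⟩
    · -- unreachable: both sides return -1
      rw [hres]
      by_cases hs : PySem.List.sorted nums1 (fun x => x) ≠ PySem.List.sorted nums2 (fun x => x)
      · rw [if_pos hs]
      · rw [if_neg hs, pvScan_none nums2 nums1 hnone]
    · -- reachable at least depth m: A returns m, B's scan finds m
      rw [hres]
      have hperm : nums2.Perm nums1 := pvDfs_perm nums2 nums1 m hm
      have hsorted : PySem.List.sorted nums1 (fun x => x) =
          PySem.List.sorted nums2 (fun x => x) := by
        refine PySem.List.sorted_id_eq_of_perm_of_pairwise nums1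
          (PySem.List.sorted nums2 (fun x => x)) ?_ ?_
        · exact (PySem.List.sorted_perm nums2 (fun x => x) false).trans hperm
        · exact PySem.List.sorted_pairwise nums2 (fun x => x)
      rw [if_neg (by simp [hsorted]), pvBound_eq]
      have hm1 : 1 ≤ m := by
        rcases Nat.eq_zero_or_pos m with rfl | h'
        · exact absurd ((pvDfs_zero_iff nums2 nums1).1 hm) h
        · exact h'
      rw [List.length_permutations] at hmle
      exact (pvScan_find nums2 nums1 m hm hlt (Nat.factorial nums1.length) 1
        hm1 (by omega)).symm
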